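-- pv_equiv track=rewrite | github.com/Max094Reikeb/to-do-list | test_report.py | determine_auto_status_code
-- ===== SOURCE A (Python) =====
-- def determine_auto_status_code(entries):
--     """
--     Determines a status code for an auto-unittest test:
--
--     - "not_found": no entry in result_test_auto.json
--     - "failed"   : at least one 'failed' or 'error'
--     - "passed"   : at least one 'passed' and no failed/error
--     """
--     if not entries:
--         return "not_found"
--
--     statuses = {e.get("status") for e in entries}
--
--     if any(s in ("failed", "error") for s in statuses):
--         return "failed"
--     if "passed" in statuses:
--         return "passed"
--
--     return "not_found"
-- ===== SOURCE B (Python) =====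
-- SEVERITY = {"failed": 2, "error": 2, "passed": 1}
--
-- def determine_auto_status_code(entries):
--     """Map each entry to a severity rank, reduce with max, index a result table."""
--     worst = max((SEVERITY.get(e.get("status"), 0) for e in entries), default=0)
--     return ("not_found", "passed", "failed")[worst]
-- ===== Notes on version B (the rewrite author's own statement) =====
-- stated objective: simpler
-- what changed: Recasts the priority logic as a numeric reduction: each entry's status is mapped to a severity rank (failed/error=2, passed=1, other=0), the ranks are reduced with max, and the answer is read from a result table indexed by the maximum, replacing A's set construction, two membership scans and empty-guard.
import Mathlib
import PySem

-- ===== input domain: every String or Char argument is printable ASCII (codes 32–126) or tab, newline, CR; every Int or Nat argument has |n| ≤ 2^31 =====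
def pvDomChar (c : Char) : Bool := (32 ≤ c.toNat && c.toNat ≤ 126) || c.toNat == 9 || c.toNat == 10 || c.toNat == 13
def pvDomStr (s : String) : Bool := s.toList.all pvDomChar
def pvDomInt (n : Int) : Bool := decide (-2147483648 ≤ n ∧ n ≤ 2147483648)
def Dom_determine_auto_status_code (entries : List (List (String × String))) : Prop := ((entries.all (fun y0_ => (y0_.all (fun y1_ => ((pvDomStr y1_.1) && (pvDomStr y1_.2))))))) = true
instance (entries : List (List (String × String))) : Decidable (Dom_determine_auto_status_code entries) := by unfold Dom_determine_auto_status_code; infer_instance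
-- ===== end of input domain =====

-- B recasts A's status-set with two membership scans as a numeric reduction:
-- map each entry to a severity rank, take the max, index a result table (objective: simpler).


-- ===== PORT A =====
-- e.get("status") on the association-list dict
def pvGetStatus (e : List (String × String)) : Option String :=
  PySem.Dict.get? (PySem.Dict.ofList e) "status"

def determine_auto_status_code (entries : List (List (String × String))) : String :=
  if entries = [] then "not_found"
  else
    let statuses : PySem.Set (Option String) :=
      PySem.Set.ofList (entries.map (fun e => pvGetStatus e))
    if statuses.any (fun s => s == some "failed" || s == some "error") then "failed"
    else if statuses.contains (some "passed") then "passed"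
    else "not_found"

-- ===== PORT B =====
-- the module constant SEVERITY dict of Source B
def pvSeverity : PySem.Dict String Nat :=
  PySem.Dict.ofList [("failed", 2), ("error", 2), ("passed", 1)]

-- SEVERITY.get(e.get("status"), 0); a None key never matches a string key
def pvRank (e : List (String × String)) : Nat :=
  match pvGetStatus e with
  | some t => PySem.Dict.getD pvSeverity t 0
  | none => 0

def determine_auto_status_code_alt (entries : List (List (String × String))) : String :=
  -- max(generator, default=0): fold of max over the mapped ranks, 0 when empty
  let worst := entries.foldl (fun m e => Nat.max m (pvRank e)) 0
  ["not_found", "passed", "failed"].getD worst "not_found"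

-- ===== PRECONDITION & SPEC =====
def Spec_determine_auto_status_code (entries : List (List (String × String))) (out : String) : Prop := out = determine_auto_status_code_alt entries
instance (entries : List (List (String × String))) (out : String) : Decidable (Spec_determine_auto_status_code entries out) := by unfold Spec_determine_auto_status_code; infer_instance

-- ===== CLAIM (what is proved, stated in full; the proofs are below) =====
def Claim_equal_determine_auto_status_code : Prop := ∀ (entries : List (List (String × String))), Dom_determine_auto_status_code entries → Spec_determine_auto_status_code entries (determine_auto_status_code entries)

-- ===== LEMMAS AND PROOFS =====

-- the severity rank in closed form
theorem pvRank_eq (e : List (String × String)) :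
    pvRank e =
      if pvGetStatus e == some "failed" || pvGetStatus e == some "error" then 2
      else if pvGetStatus e == some "passed" then 1 else 0 := by
  unfold pvRank
  cases h : pvGetStatus e with
  | none => simp
  | some t =>
      have hsev : pvSeverity = PySem.Dict.mk [("failed", 2), ("error", 2), ("passed", 1)] := by
        decide
      by_cases h1 : t = "failed"
      · subst h1; decide
      · by_cases h2 : t = "error"
        · subst h2; simp; decide
        · by_cases h3 : t = "passed"
          · subst h3; simp; decide
          · simp [hsev, PySem.Dict.getD, Ne.symm h1, Ne.symm h2, Ne.symm h3, h1, h2, h3, PySem.Dict.get?]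

-- B's fold characterised by the two anys A ends up testing
theorem fold_char (l : List (List (String × String))) (a : Nat) (ha : a = 0) :
    l.foldl (fun m e => Nat.max m (pvRank e)) a =
      if l.any (fun e => pvGetStatus e == some "failed" || pvGetStatus e == some "error") then 2
      else if l.any (fun e => pvGetStatus e == some "passed") then 1 else 0 := by
  subst ha
  induction l with
  | nil => simp
  | cons e t ih =>
      have step : ∀ (b : Nat) (l' : List (List (String × String))),
          l'.foldl (fun m e => Nat.max m (pvRank e)) b =
            Nat.max b (l'.foldl (fun m e => Nat.max m (pvRank e)) 0) := by
        intro b l'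
        induction l' generalizing b with
        | nil => simp
        | cons x xs ihx =>
            simp only [List.foldl_cons]
            rw [ihx (Nat.max b (pvRank x)), ihx (Nat.max 0 (pvRank x))]
            simp [Nat.max_assoc]
      simp only [List.foldl_cons, List.any_cons]
      rw [step, ih, pvRank_eq]
      by_cases h1 : (pvGetStatus e == some "failed" || pvGetStatus e == some "error") = true <;>
        by_cases h2 : (pvGetStatus e == some "passed") = true <;>
          by_cases h3 : (t.any (fun e => pvGetStatus e == some "failed" || pvGetStatus e == some "error")) = true <;>
            by_cases h4 : (t.any (fun e => pvGetStatus e == some "passed")) = true <;>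
              simp [h1, h2, h3, h4]

-- any/contains over the set built from a list equal any/contains over the list
theorem set_any_eq {α : Type} [BEq α] [LawfulBEq α] (l : List α) (p : α → Bool) :
    (PySem.Set.ofList l).any p = l.any p := by
  rw [Bool.eq_iff_iff]; simp [List.any_eq_true, PySem.Set.mem_ofList]

theorem set_contains_eq {α : Type} [BEq α] [LawfulBEq α] (l : List α) (x : α) :
    (PySem.Set.ofList l).contains x = l.contains x := by
  rw [Bool.eq_iff_iff]; simp [List.contains_eq_mem, PySem.Set.mem_ofList]

theorem contains_map_any {α β : Type} [BEq β] [LawfulBEq β] (l : List α) (f : α → β) (x : β) :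
    (l.map f).contains x = l.any (fun a => f a == x) := by
  induction l with
  | nil => rfl
  | cons a t ih =>
      simp only [List.map_cons, List.contains_cons, List.any_cons, ih, BEq.comm]

-- ===== VERDICT (by name: the statement is the Claim_ definition above) =====
theorem determine_auto_status_code_spec : Claim_equal_determine_auto_status_code := by
  intro entries _
  show determine_auto_status_code entries = determine_auto_status_code_alt entries
  unfold determine_auto_status_code determine_auto_status_code_alt
  rw [fold_char entries 0 rfl]
  cases entries with
  | nil => rfl
  | cons e rest =>
      simp only [if_neg (List.cons_ne_nil e rest), set_any_eq, set_contains_eq,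
        contains_map_any, List.any_map, Function.comp_def]
      by_cases h1 : ((e :: rest).any (fun x => pvGetStatus x == some "failed" || pvGetStatus x == some "error")) = true <;>
        by_cases h2 : ((e :: rest).any (fun x => pvGetStatus x == some "passed")) = true <;>
          simp [h1, h2]
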